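-- pv_equiv track=rewrite | github.com/ericahn/anki-chinese | addon/pinyin/html.py | generate_ruby
-- ===== SOURCE A (Python) =====
-- def generate_ruby(ruby_struct):
--     html = ''
--     prev = False
--     for is_ruby, main, pinyins in ruby_struct:
--         if is_ruby:
--             to_add  = ' ' if prev else ''
--             to_add += '<ruby>{}<rt>{}</ruby>'.format(main, ''.join(pinyins))
--         else:
--             to_add = main
--         prev = is_ruby
--         html += to_add
--     return html
-- ===== SOURCE B (Python) =====
-- def generate_ruby(ruby_struct):
--     # Run-based decomposition: split the structure into maximal runs of equal
--     # is_ruby flag (a hand-rolled groupby: the inner while is a span), render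
--     # each run at once -- ruby runs joined by single spaces, plain runs simply
--     # concatenated -- and concatenate the run strings.  No `prev` flag.
--     parts = []
--     rest = list(ruby_struct)
--     while rest:
--         flag = rest[0][0]
--         k = 0
--         while k < len(rest) and rest[k][0] == flag:
--             k += 1
--         run, rest = rest[:k], rest[k:]
--         if flag:
--             parts.append(' '.join(
--                 '<ruby>{}<rt>{}</ruby>'.format(m, ''.join(p)) for _, m, p in run))
--         else:
--             parts.append(''.join(m for _, m, _ in run))
--     return ''.join(parts)
-- ===== Notes on version B (the rewrite author's own statement) =====
-- stated objective: alternative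
-- what changed: Replaces the element-by-element loop carrying a prev flag with a run-based decomposition: the list is split into maximal runs of equal is_ruby flag, each ruby run is rendered with ' '.join and each plain run with ''.join, and the run strings are concatenated.
import Mathlib
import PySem

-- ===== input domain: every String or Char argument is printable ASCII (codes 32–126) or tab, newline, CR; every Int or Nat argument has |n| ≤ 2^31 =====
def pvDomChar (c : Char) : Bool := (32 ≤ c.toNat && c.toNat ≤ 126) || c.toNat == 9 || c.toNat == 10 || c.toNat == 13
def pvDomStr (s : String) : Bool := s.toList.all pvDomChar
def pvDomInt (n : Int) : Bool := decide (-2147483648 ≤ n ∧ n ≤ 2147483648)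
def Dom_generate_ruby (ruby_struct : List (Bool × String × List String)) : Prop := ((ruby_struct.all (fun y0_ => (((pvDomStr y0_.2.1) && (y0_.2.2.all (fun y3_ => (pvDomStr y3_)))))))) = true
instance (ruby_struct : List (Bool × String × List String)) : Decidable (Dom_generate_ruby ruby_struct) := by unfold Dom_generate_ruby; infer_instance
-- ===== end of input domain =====

-- B replaces A's element loop with a prev flag by a run-based decomposition
-- (maximal runs of equal is_ruby flag, ruby runs joined by single spaces);
-- same cost, alternative structure.

-- ===== PORT A =====
-- A: one loop over elements, state (html, prev); a ruby element gets a leading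
-- space exactly when the previous element was a ruby element.
def generate_ruby (ruby_struct : List (Bool × String × List String)) : String :=
  (ruby_struct.foldl
    (fun (st : String × Bool) e =>
      let to_add : String :=
        if e.1 then
          (if st.2 then " " else "") ++
            ("<ruby>" ++ e.2.1 ++ "<rt>" ++ PySem.Str.join "" e.2.2 ++ "</ruby>")
        else e.2.1
      (st.1 ++ to_add, e.1))
    ("", false)).1

-- ===== PORT B =====
-- Source B's inner `while k < len(rest) and rest[k][0] == flag` followed by the
-- slices rest[:k], rest[k:] is exactly span = (takeWhile, dropWhile).
def pvRunStr (flag : Bool) (run : List (Bool × String × List String)) : String :=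
  if flag then
    PySem.Str.join " "
      (run.map (fun e => "<ruby>" ++ e.2.1 ++ "<rt>" ++ PySem.Str.join "" e.2.2 ++ "</ruby>"))
  else
    PySem.Str.join "" (run.map (fun e => e.2.1))

-- the outer while loop of Source B: peel off one maximal run per step
def pvGroups : List (Bool × String × List String) → List String
  | [] => []
  | e :: t =>
    pvRunStr e.1 (e :: t.takeWhile (fun x => x.1 == e.1)) ::
      pvGroups (t.dropWhile (fun x => x.1 == e.1))
  termination_by l => l.length
  decreasing_by
    simpa using Nat.lt_succ_of_le (List.length_dropWhile_le _ _)

def generate_ruby_alt (ruby_struct : List (Bool × String × List String)) : String :=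
  PySem.Str.join "" (pvGroups ruby_struct)

-- ===== PRECONDITION & SPEC =====
def Spec_generate_ruby (ruby_struct : List (Bool × String × List String)) (out : String) : Prop := out = generate_ruby_alt ruby_struct
instance (ruby_struct : List (Bool × String × List String)) (out : String) : Decidable (Spec_generate_ruby ruby_struct out) := by unfold Spec_generate_ruby; infer_instance

-- ===== CLAIM (what is proved, stated in full; the proofs are below) =====
def Claim_equal_generate_ruby : Prop := ∀ (ruby_struct : List (Bool × String × List String)), Dom_generate_ruby ruby_struct → Spec_generate_ruby ruby_struct (generate_ruby ruby_struct)

-- ===== LEMMAS AND PROOFS =====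

-- the HTML fragment of one element, as A renders it (no leading space)
def pvElemStr (e : Bool × String × List String) : String :=
  if e.1 then "<ruby>" ++ e.2.1 ++ "<rt>" ++ PySem.Str.join "" e.2.2 ++ "</ruby>" else e.2.1

-- A's loop, restated without the accumulator: what it appends after state prev
def pvRestA (prev : Bool) : List (Bool × String × List String) → String
  | [] => ""
  | e :: t =>
      ((if prev && e.1 then " " else "") ++ pvElemStr e) ++ pvRestA e.1 t

-- is_ruby flag of the head (false for the empty list)
def pvHeadFlag : List (Bool × String × List String) → Bool
  | [] => false
  | e :: _ => e.1

theorem pv_join_nil (sep : String) : PySem.Str.join sep [] = "" := by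
  apply String.toList_inj.mp
  simp [PySem.Str.toList_join, PySem.Chars.join, List.intercalate]

theorem pv_join_empty_cons (a : String) (l : List String) :
    PySem.Str.join "" (a :: l) = a ++ PySem.Str.join "" l := by
  apply String.toList_inj.mp
  cases l with
  | nil =>
    simp [PySem.Str.toList_join, PySem.Chars.join, List.intercalate]
  | cons b l =>
    simp [PySem.Str.toList_join, PySem.Chars.join_cons_cons]

theorem pv_join_sep_cons_cons (sep a b : String) (l : List String) :
    PySem.Str.join sep (a :: b :: l) = a ++ sep ++ PySem.Str.join sep (b :: l) := by
  apply String.toList_inj.mp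
  simp [PySem.Str.toList_join, PySem.Chars.join_cons_cons]

theorem pv_join_singleton (sep a : String) :
    PySem.Str.join sep [a] = a := by
  apply String.toList_inj.mp
  simp [PySem.Str.toList_join, PySem.Chars.join_singleton]

-- a run string splits off its first element, separated iff the run is a ruby run
theorem pv_runStr_cons_cons (flag : Bool) (e f : Bool × String × List String)
    (l : List (Bool × String × List String)) :
    pvRunStr flag (e :: f :: l) =
      pvElemStr ⟨flag, e.2⟩ ++ (if flag then " " else "") ++ pvRunStr flag (f :: l) := by
  cases flag <;>
    simp [pvRunStr, pvElemStr, pv_join_sep_cons_cons, pv_join_empty_cons]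

-- one unfolding step of B: the first element comes out, followed by a space
-- exactly when it and the next element are both rubies
theorem pv_alt_unfold (e : Bool × String × List String)
    (t : List (Bool × String × List String)) :
    PySem.Str.join "" (pvGroups (e :: t)) =
      pvElemStr e ++ (if e.1 && pvHeadFlag t then " " else "") ++
        PySem.Str.join "" (pvGroups t) := by
  have hr : pvRunStr e.1 [e] = pvElemStr e := by
    cases h : e.1 <;> simp [pvRunStr, pvElemStr, h, pv_join_singleton]
  cases t with
  | nil =>
    rw [pvGroups]
    simp only [List.takeWhile_nil, List.dropWhile_nil, pvGroups]
    rw [pv_join_empty_cons, hr, pvHeadFlag]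
    simp [pv_join_nil]
  | cons f t' =>
    by_cases hf : f.1 = e.1
    · rw [pvGroups, pvGroups]
      simp only [List.takeWhile_cons, List.dropWhile_cons, hf, beq_self_eq_true]
      simp only [if_true]
      rw [pv_join_empty_cons, pv_join_empty_cons, pv_runStr_cons_cons]
      have he : pvElemStr ⟨e.1, e.2⟩ = pvElemStr e := rfl
      rw [he, pvHeadFlag, hf]
      cases h : e.1 <;> simp [String.append_assoc]
    · have hb : (f.1 == e.1) = false := beq_eq_false_iff_ne.mpr hf
      rw [pvGroups]
      simp only [List.takeWhile_cons, List.dropWhile_cons, hb]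
      simp only [Bool.false_eq_true, if_false]
      rw [pv_join_empty_cons, hr, pvHeadFlag]
      have : (e.1 && f.1) = false := by
        cases h : e.1 <;> cases h2 : f.1 <;> simp_all
      rw [this]
      simp

-- A's tail, after state prev, is B's rendering with a leading space exactly
-- when prev and the head are both rubies
theorem pv_restA_eq (l : List (Bool × String × List String)) (prev : Bool) :
    pvRestA prev l =
      (if prev && pvHeadFlag l then " " else "") ++ PySem.Str.join "" (pvGroups l) := by
  induction l generalizing prev with
  | nil =>
    simp [pvRestA, pvHeadFlag, pvGroups, pv_join_nil]
  | cons e t ih =>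
    rw [pvRestA, ih, pv_alt_unfold, pvHeadFlag]
    cases hp : prev <;> cases h : e.1 <;>
      simp [String.append_assoc]

-- A's accumulator folded out
theorem pv_foldA (l : List (Bool × String × List String)) (html : String) (prev : Bool) :
    (l.foldl
      (fun (st : String × Bool) e =>
        let to_add : String :=
          if e.1 then
            (if st.2 then " " else "") ++
              ("<ruby>" ++ e.2.1 ++ "<rt>" ++ PySem.Str.join "" e.2.2 ++ "</ruby>")
          else e.2.1
        (st.1 ++ to_add, e.1))
      (html, prev)).1 = html ++ pvRestA prev l := by
  induction l generalizing html prev with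
  | nil => simp [pvRestA]
  | cons e t ih =>
    rw [List.foldl_cons, ih]
    rw [pvRestA, String.append_assoc]
    congr 1
    cases hp : prev <;> cases h : e.1 <;>
      simp [h, pvElemStr, String.append_assoc]

-- ===== VERDICT (by name: the statement is the Claim_ definition above) =====
theorem generate_ruby_spec : Claim_equal_generate_ruby := by
  intro rs _
  show generate_ruby rs = generate_ruby_alt rs
  rw [generate_ruby, pv_foldA, pv_restA_eq]
  simp [generate_ruby_alt]
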